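-- pv_equiv track=rewrite | github.com/DominikWojtanowski/Matura-informatyka | 2015 - Przykladowy arkusz/Zadanie 3/zadanie_3.py | schodyITP
-- ===== SOURCE A (Python) =====
-- from typing import List, Tuple
--
-- def schodyITP(arr: List[int]) -> List[Tuple[List[int], int, int]]:
--     res: List[Tuple[List[int], int, int]] = []
--
--     schody_list: List[int] = []
--     dlugosc_schodow = 0
--     ilosc_progow = 0
--
--     isInProgress = False
--
--     for idx in range(0, arr.__len__() - 1):
--         if arr[idx] >= arr[idx + 1]:
--             if arr[idx] != arr[idx + 1]:
--                 ilosc_progow += 1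
--             schody_list.append(arr[idx])
--             dlugosc_schodow += 1
--             isInProgress = True
--
--         else:
--             schody_list.append(arr[idx])
--             new_list = schody_list.copy()
--             if isInProgress:
--                 res.append((new_list,dlugosc_schodow + 1,ilosc_progow))
--             dlugosc_schodow = 0
--             ilosc_progow = 0
--
--             schody_list.clear()
--
--             isInProgress = False
--
--     if isInProgress:
--         schody_list.append(arr[-1])
--     new_list = schody_list.copy()
--     if isInProgress:
--         res.append((new_list,dlugosc_schodow + 1,ilosc_progow))
--     return res
-- ===== SOURCE B (Python) =====
-- from typing import List, Tuple
--
-- def schodyITP(arr: List[int]) -> List[Tuple[List[int], int, int]]: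
--     # Phase 1: partition arr into maximal non-increasing runs.
--     runs: List[List[int]] = []
--     cur: List[int] = []
--     for x in arr:
--         if cur and cur[-1] < x:
--             runs.append(cur)
--             cur = [x]
--         else:
--             cur.append(x)
--     if cur:
--         runs.append(cur)
--     # Phase 2: keep runs of length >= 2, with length and number of strict drops.
--     res: List[Tuple[List[int], int, int]] = []
--     for r in runs:
--         if len(r) >= 2:
--             drops = sum(1 for a, b in zip(r, r[1:]) if a > b)
--             res.append((r, len(r), drops))
--     return res
-- ===== Notes on version B (the rewrite author's own statement) =====
-- stated objective: simpler
-- what changed: Replaces A's single stateful index scan (five loop variables: result, buffer, two counters and an in-progress flag) by two clear phases: partition arr into maximal non-increasing runs, then map each run of length >= 2 to (run, length, strict-drop count).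
import Mathlib
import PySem

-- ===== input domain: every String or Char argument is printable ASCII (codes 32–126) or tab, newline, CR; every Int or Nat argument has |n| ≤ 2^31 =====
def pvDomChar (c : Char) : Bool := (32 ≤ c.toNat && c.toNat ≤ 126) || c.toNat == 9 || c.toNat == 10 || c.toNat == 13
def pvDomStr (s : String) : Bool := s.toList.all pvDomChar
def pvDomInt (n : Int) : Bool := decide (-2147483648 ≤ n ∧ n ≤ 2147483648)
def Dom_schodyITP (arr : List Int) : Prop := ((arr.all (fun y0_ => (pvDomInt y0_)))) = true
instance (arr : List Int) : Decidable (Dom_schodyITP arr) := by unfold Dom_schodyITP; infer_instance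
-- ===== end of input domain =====

-- B replaces A's single stateful scan by two phases (split arr into maximal
-- non-increasing runs, then map the runs of length ≥ 2); objective: simpler.

-- ===== PORT A =====
-- A's loop body: state (res, schody_list, dlugosc_schodow, ilosc_progow, isInProgress);
-- a = arr[idx], b = arr[idx+1]; 'arr[idx] >= arr[idx+1]' is 'b ≤ a'.
def pvStepA (st : List (List Int × Int × Int) × List Int × Int × Int × Bool)
    (a b : Int) : List (List Int × Int × Int) × List Int × Int × Int × Bool :=
  match st with
  | (res, schody, dl, pr, ip) =>
    if b ≤ a then
      (res, schody ++ [a], dl + 1, if a ≠ b then pr + 1 else pr, true)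
    else
      (if ip then res ++ [(schody ++ [a], dl + 1, pr)] else res, ([] : List Int), (0 : Int), (0 : Int), false)

def schodyITP (arr : List Int) : List (List Int × Int × Int) :=
  let st := (PySem.List.pyRange 0 ((arr.length : Int) - 1) 1).foldl
    (fun s idx => pvStepA s (PySem.List.pyGetD arr idx 0) (PySem.List.pyGetD arr (idx + 1) 0))
    ([], [], 0, 0, false)
  match st with
  | (res, schody, dl, pr, ip) =>
    if ip then res ++ [(schody ++ [PySem.List.pyGetD arr (-1) 0], dl + 1, pr)] else res

-- ===== PORT B =====
-- sum(1 for a, b in zip(r, r[1:]) if a > b)   (r[1:] on a list is List.drop 1 — exact)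
def pvDrops (r : List Int) : Int :=
  ((r.zip (r.drop 1)).map (fun p => if p.2 < p.1 then (1 : Int) else 0)).sum

-- B's loop body: state (runs, cur); 'if cur and cur[-1] < x'.
def pvStepB (st : List (List Int) × List Int) (x : Int) : List (List Int) × List Int :=
  match st.2.getLast? with
  | some l => if l < x then (st.1 ++ [st.2], [x]) else (st.1, st.2 ++ [x])
  | none => (st.1, st.2 ++ [x])

def schodyITP_alt (arr : List Int) : List (List Int × Int × Int) :=
  let st := arr.foldl pvStepB ([], [])
  let runs := if st.2 ≠ [] then st.1 ++ [st.2] else st.1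
  (runs.filter (fun r => 2 ≤ r.length)).map (fun r => (r, (r.length : Int), pvDrops r))

-- ===== PRECONDITION & SPEC =====
def Spec_schodyITP (arr : List Int) (out : List (List Int × Int × Int)) : Prop := out = schodyITP_alt arr
instance (arr : List Int) (out : List (List Int × Int × Int)) : Decidable (Spec_schodyITP arr out) := by unfold Spec_schodyITP; infer_instance

-- ===== CLAIM (what is proved, stated in full; the proofs are below) =====
def Claim_equal_schodyITP : Prop := ∀ (arr : List Int), Dom_schodyITP arr → Spec_schodyITP arr (schodyITP arr)

-- ===== LEMMAS AND PROOFS =====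

-- Phase 2 of B as a function of the run list.
def pvMkRes (runs : List (List Int)) : List (List Int × Int × Int) :=
  (runs.filter (fun r => 2 ≤ r.length)).map (fun r => (r, (r.length : Int), pvDrops r))

-- A's final block as a function of the loop state and arr[-1].
def pvFinA (st : List (List Int × Int × Int) × List Int × Int × Int × Bool)
    (last : Int) : List (List Int × Int × Int) :=
  match st with
  | (res, schody, dl, pr, ip) =>
    if ip then res ++ [(schody ++ [last], dl + 1, pr)] else res



lemma pvDrops_cons_cons (a b : Int) (t : List Int) :
    pvDrops (a :: b :: t) = (if b < a then 1 else 0) + pvDrops (b :: t) := by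
  simp [pvDrops]

lemma pvDrops_append (l : List Int) (x y : Int) :
    pvDrops (l ++ [x] ++ [y]) = pvDrops (l ++ [x]) + (if y < x then 1 else 0) := by
  induction l with
  | nil => simp [pvDrops]
  | cons a l ih =>
    cases l with
    | nil => simp [pvDrops]
    | cons b t =>
      simp only [List.cons_append] at ih ⊢
      rw [pvDrops_cons_cons, pvDrops_cons_cons a b, ih]
      ring

lemma pv_getD_neg_one (a : Int) (rest : List Int) :
    PySem.List.pyGetD (a :: rest) (-1) 0 = (a :: rest).getLast (by simp) := by
  simp only [PySem.List.pyGetD, PySem.List.pyGet?, PySem.List.pyIdx?]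
  norm_num
  rw [List.getLast_eq_getElem]
  simp only [List.length_cons, Nat.add_sub_cancel]
  rfl

lemma pv_aux {σ : Type} (f : σ → Int → Int → σ) :
    ∀ (rest : List Int) (a : Int) (init : σ),
    (List.range rest.length).foldl
      (fun s i => f s ((a :: rest).getD i 0) ((a :: rest).getD (i + 1) 0)) init
    = ((a :: rest).zip rest).foldl (fun s p => f s p.1 p.2) init := by
  intro rest
  induction rest with
  | nil => intro a init; simp
  | cons b t ih =>
    intro a init
    rw [List.length_cons, List.range_succ_eq_map, List.zip_cons_cons]
    simp only [List.foldl_cons, List.foldl_map, List.getD_cons_succ, List.getD_cons_zero]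
    exact ih b _

lemma pv_pairfold {σ : Type} (f : σ → Int → Int → σ) (arr : List Int) (init : σ) :
    (PySem.List.pyRange 0 ((arr.length : Int) - 1) 1).foldl
      (fun s idx => f s (PySem.List.pyGetD arr idx 0) (PySem.List.pyGetD arr (idx + 1) 0)) init
    = (arr.zip (arr.drop 1)).foldl (fun s p => f s p.1 p.2) init := by
  cases arr with
  | nil => simp [PySem.List.pyRange]
  | cons a rest =>
    have h : ((a :: rest).length : Int) - 1 = (rest.length : Nat) := by
      simp
    rw [h, PySem.List.pyRange_zero_natCast]
    simp only [List.foldl_map, List.drop_one, List.tail_cons]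
    have hc : ∀ (i : Nat), ((i : Int) + 1) = ((i + 1 : Nat) : Int) := by intro i; push_cast; ring
    simp only [hc, PySem.List.pyGetD_natCast]
    exact pv_aux f rest a init





lemma pvMkRes_append (rs : List (List Int)) (r : List Int) :
    pvMkRes (rs ++ [r]) = pvMkRes rs ++ (if 2 ≤ r.length then [(r, (r.length : Int), pvDrops r)] else []) := by
  simp only [pvMkRes, List.filter_append, List.map_append]
  split_ifs with h <;> simp [h]

lemma pv_loop (rest : List Int) : ∀ (x : Int) (pre : List Int) (runs : List (List Int)),
    pvFinA (((x :: rest).zip rest).foldl (fun s p => pvStepA s p.1 p.2)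
        (pvMkRes runs, pre, (pre.length : Int), pvDrops (pre ++ [x]), !pre.isEmpty))
      ((x :: rest).getLast (by simp))
    = pvMkRes ((fun st : List (List Int) × List Int =>
        if st.2 ≠ [] then st.1 ++ [st.2] else st.1) (rest.foldl pvStepB (runs, pre ++ [x]))) := by
  induction rest with
  | nil =>
    intro x pre runs
    simp only [List.zip_nil_right, List.foldl_nil, List.getLast_singleton]
    rw [if_pos (by simp), pvMkRes_append]
    by_cases hp : pre = []
    · subst hp; simp [pvFinA]
    · have h1 : (!pre.isEmpty) = true := by simp [hp]
      have h2 : 2 ≤ (pre ++ [x]).length := by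
        cases pre with | nil => exact absurd rfl hp | cons c cs => simp
      rw [if_pos h2]
      simp [pvFinA, h1]
  | cons y rest ih =>
    intro x pre runs
    rw [List.zip_cons_cons]
    simp only [List.foldl_cons]
    have hlast : (x :: y :: rest).getLast (by simp) = (y :: rest).getLast (by simp) :=
      List.getLast_cons (by simp)
    rw [hlast]
    by_cases hxy : y ≤ x
    · -- non-increasing step: extend the current run
      have hA : pvStepA (pvMkRes runs, pre, (pre.length : Int), pvDrops (pre ++ [x]), !pre.isEmpty) x y
          = (pvMkRes runs, pre ++ [x], ((pre ++ [x]).length : Int), pvDrops (pre ++ [x] ++ [y]), !(pre ++ [x]).isEmpty) := by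
        simp only [pvStepA, if_pos hxy]
        rw [pvDrops_append]
        have h3 : (if x ≠ y then pvDrops (pre ++ [x]) + 1 else pvDrops (pre ++ [x]))
            = pvDrops (pre ++ [x]) + (if y < x then 1 else 0) := by split_ifs <;> omega
        rw [h3]
        simp
      have hB : pvStepB (runs, pre ++ [x]) y = (runs, (pre ++ [x]) ++ [y]) := by
        simp only [pvStepB, List.getLast?_concat]
        rw [if_neg (by omega)]
      rw [hA, hB]
      exact ih y (pre ++ [x]) runs
    · -- strict ascent: close the run
      have hA : pvStepA (pvMkRes runs, pre, (pre.length : Int), pvDrops (pre ++ [x]), !pre.isEmpty) x y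
          = (pvMkRes (runs ++ [pre ++ [x]]), ([] : List Int), ((0:Int)), pvDrops ([] ++ [y]), !([] : List Int).isEmpty) := by
        simp only [pvStepA, if_neg hxy]
        rw [pvMkRes_append]
        by_cases hp : pre = []
        · subst hp; simp [pvDrops]
        · have h1 : (!pre.isEmpty) = true := by simp [hp]
          have h2 : 2 ≤ (pre ++ [x]).length := by
            cases pre with | nil => exact absurd rfl hp | cons c cs => simp
          rw [if_pos h2]
          simp [h1, pvDrops]
      have hB : pvStepB (runs, pre ++ [x]) y = (runs ++ [pre ++ [x]], [] ++ [y]) := by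
        simp only [pvStepB, List.getLast?_concat]
        rw [if_pos (by omega)]
        simp
      rw [hA, hB]
      exact ih y [] (runs ++ [pre ++ [x]])

-- ===== VERDICT (by name: the statement is the Claim_ definition above) =====
theorem schodyITP_spec : Claim_equal_schodyITP := by
  unfold Claim_equal_schodyITP
  intro arr _
  unfold Spec_schodyITP
  cases arr with
  | nil => rfl
  | cons a rest =>
    show schodyITP (a :: rest) = schodyITP_alt (a :: rest)
    unfold schodyITP schodyITP_alt
    rw [pv_pairfold pvStepA, pv_getD_neg_one]
    exact pv_loop rest a [] []
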